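-- pv_equiv track=rewrite | github.com/vosslab/webwork-pgml-linter | pgml_lint/plugins/pgml_pgml_parse_hazards.py | _paren_balance
-- ===== SOURCE A (Python) =====
-- def _paren_balance(text: str) -> int:
-- 	"""
-- 	Return paren balance count (0 means balanced).
-- 	"""
-- 	in_sq = False
-- 	in_dq = False
-- 	escape = False
-- 	balance = 0
-- 	for ch in text:
-- 		if escape:
-- 			escape = False
-- 			continue
-- 		if ch == "\\":
-- 			escape = True
-- 			continue
-- 		if in_sq:
-- 			if ch == "'":
-- 				in_sq = False
-- 			continue
-- 		if in_dq:
-- 			if ch == '"':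
-- 				in_dq = False
-- 			continue
-- 		if ch == "'":
-- 			in_sq = True
-- 			continue
-- 		if ch == '"':
-- 			in_dq = True
-- 			continue
-- 		if ch == "(":
-- 			balance += 1
-- 		elif ch == ")":
-- 			balance -= 1
-- 	return balance
-- ===== SOURCE B (Python) =====
-- def _paren_balance(text: str) -> int:
-- 	"""
-- 	Return paren balance count (0 means balanced).
-- 	"""
-- 	balance = 0
-- 	i = 0
-- 	n = len(text)
-- 	while i < n:
-- 		ch = text[i]
-- 		if ch == "\\":
-- 			i += 2
-- 		elif ch == "'" or ch == '"':
-- 			i += 1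
-- 			while i < n:
-- 				if text[i] == "\\":
-- 					i += 2
-- 				elif text[i] == ch:
-- 					i += 1
-- 					break
-- 				else:
-- 					i += 1
-- 		elif ch == "(":
-- 			balance += 1
-- 			i += 1
-- 		elif ch == ")":
-- 			balance -= 1
-- 			i += 1
-- 		else:
-- 			i += 1
-- 	return balance
-- ===== Notes on version B (the rewrite author's own statement) =====
-- stated objective: alternative
-- what changed: Replaced A's single pass driven by four state flags (in_sq/in_dq/escape/balance) by an index-jumping scan: skip each escaped pair outright, jump past each quoted region with a dedicated inner loop, and count parens only in the outer loop.
import Mathlib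
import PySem

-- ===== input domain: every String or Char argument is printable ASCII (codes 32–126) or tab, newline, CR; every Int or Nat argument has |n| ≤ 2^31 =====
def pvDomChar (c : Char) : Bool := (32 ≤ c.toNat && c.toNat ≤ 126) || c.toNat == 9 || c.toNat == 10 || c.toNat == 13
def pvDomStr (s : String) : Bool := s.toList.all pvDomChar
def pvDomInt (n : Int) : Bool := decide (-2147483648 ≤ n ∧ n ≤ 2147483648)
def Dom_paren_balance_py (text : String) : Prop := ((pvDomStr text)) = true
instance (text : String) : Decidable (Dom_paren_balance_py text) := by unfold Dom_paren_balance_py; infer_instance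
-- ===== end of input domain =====

-- B replaces A's four-flag single-pass state machine by an index-jumping scan (skip escaped pairs,
-- jump past each quoted region with an inner loop, count parens outside); objective: alternative decomposition.

-- ===== PORT A =====
-- A's loop state = (in_sq, in_dq, escape, balance); one iteration of A's for-loop, branches in A's order
def pvAStep (st : Bool × Bool × Bool × Int) (ch : Char) : Bool × Bool × Bool × Int :=
  match st with
  | (in_sq, in_dq, escape, balance) =>
    if escape then (in_sq, in_dq, false, balance)
    else if ch = '\\' then (in_sq, in_dq, true, balance)
    else if in_sq then (if ch = '\'' then false else in_sq, in_dq, escape, balance)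
    else if in_dq then (in_sq, if ch = '"' then false else in_dq, escape, balance)
    else if ch = '\'' then (true, in_dq, escape, balance)
    else if ch = '"' then (in_sq, true, escape, balance)
    else if ch = '(' then (in_sq, in_dq, escape, balance + 1)
    else if ch = ')' then (in_sq, in_dq, escape, balance - 1)
    else st

def paren_balance_py (text : String) : Int :=
  (text.toList.foldl pvAStep (false, false, false, 0)).2.2.2

-- ===== PORT B =====
-- inner while loop of B: consume characters up to and including the closing quote q
def pvSkipQ (q : Char) : List Char → List Char
  | [] => []
  | c :: rest =>
    if c = '\\' then pvSkipQ q (rest.drop 1)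
    else if c = q then rest
    else pvSkipQ q rest
termination_by cs => cs.length
decreasing_by all_goals (simp <;> omega)

theorem pvSkipQ_length_le (q : Char) (cs : List Char) : (pvSkipQ q cs).length ≤ cs.length := by
  match cs with
  | [] => simp [pvSkipQ]
  | c :: rest =>
    by_cases h1 : c = '\\'
    · have ih := pvSkipQ_length_le q (rest.drop 1)
      rw [List.drop_one] at ih
      have ht := List.length_tail (l := rest)
      simp [pvSkipQ, h1] <;> omega
    · by_cases h2 : c = q
      · subst h2
        simp [pvSkipQ, h1]
      · have ih := pvSkipQ_length_le q rest
        simp [pvSkipQ, h1, h2] <;> omega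
termination_by cs.length
decreasing_by all_goals (simp <;> omega)

-- outer while loop of B
def pvGo : List Char → Int → Int
  | [], bal => bal
  | c :: rest, bal =>
    if c = '\\' then pvGo (rest.drop 1) bal
    else if c = '\'' ∨ c = '"' then pvGo (pvSkipQ c rest) bal
    else if c = '(' then pvGo rest (bal + 1)
    else if c = ')' then pvGo rest (bal - 1)
    else pvGo rest bal
termination_by cs => cs.length
decreasing_by all_goals ((try have h := pvSkipQ_length_le c rest); simp <;> omega)

def paren_balance_py_alt (text : String) : Int := pvGo text.toList 0

-- ===== PRECONDITION & SPEC =====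
def Spec_paren_balance_py (text : String) (out : Int) : Prop := out = paren_balance_py_alt text
instance (text : String) (out : Int) : Decidable (Spec_paren_balance_py text out) := by unfold Spec_paren_balance_py; infer_instance

-- ===== CLAIM (what is proved, stated in full; the proofs are below) =====
def Claim_equal_paren_balance_py : Prop := ∀ (text : String), Dom_paren_balance_py text → Spec_paren_balance_py text (paren_balance_py text)

-- ===== LEMMAS AND PROOFS =====

-- with the escape flag set, A ignores the next character
theorem pvA_escape (sq dq : Bool) (b : Int) (cs : List Char) :
    (cs.foldl pvAStep (sq, dq, true, b)).2.2.2
      = (cs.tail.foldl pvAStep (sq, dq, false, b)).2.2.2 := by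
  cases cs with
  | nil => rfl
  | cons c rest => simp [List.foldl_cons, pvAStep]

-- inside a single-quoted region, A's run equals resuming in the plain state after pvSkipQ
theorem pvA_sq (cs : List Char) (b : Int) :
    (cs.foldl pvAStep (true, false, false, b)).2.2.2
      = ((pvSkipQ '\'' cs).foldl pvAStep (false, false, false, b)).2.2.2 := by
  match cs with
  | [] => simp [pvSkipQ]
  | c :: rest =>
    by_cases h1 : c = '\\'
    · subst h1
      have ih := pvA_sq (rest.drop 1) b
      rw [List.drop_one] at ih
      simp only [List.foldl_cons]
      simp [pvAStep, pvSkipQ]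
      rw [pvA_escape]
      exact ih
    · by_cases h2 : c = '\''
      · subst h2
        simp only [List.foldl_cons]
        simp [pvAStep, pvSkipQ, h1]
      · have ih := pvA_sq rest b
        simp only [List.foldl_cons]
        simp [pvAStep, pvSkipQ, h1, h2]
        exact ih
termination_by cs.length
decreasing_by all_goals (simp <;> omega)

-- inside a double-quoted region, likewise
theorem pvA_dq (cs : List Char) (b : Int) :
    (cs.foldl pvAStep (false, true, false, b)).2.2.2
      = ((pvSkipQ '"' cs).foldl pvAStep (false, false, false, b)).2.2.2 := by
  match cs with
  | [] => simp [pvSkipQ]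
  | c :: rest =>
    by_cases h1 : c = '\\'
    · subst h1
      have ih := pvA_dq (rest.drop 1) b
      rw [List.drop_one] at ih
      simp only [List.foldl_cons]
      simp [pvAStep, pvSkipQ]
      rw [pvA_escape]
      exact ih
    · by_cases h2 : c = '"'
      · subst h2
        simp only [List.foldl_cons]
        simp [pvAStep, pvSkipQ, h1]
      · have ih := pvA_dq rest b
        simp only [List.foldl_cons]
        simp [pvAStep, pvSkipQ, h1, h2]
        exact ih
termination_by cs.length
decreasing_by all_goals (simp <;> omega)

-- outside quotes, A's run equals B's outer loop
theorem pvA_main (cs : List Char) (b : Int) :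
    (cs.foldl pvAStep (false, false, false, b)).2.2.2 = pvGo cs b := by
  match cs with
  | [] => simp [pvGo]
  | c :: rest =>
    by_cases h1 : c = '\\'
    · subst h1
      have ih := pvA_main (rest.drop 1) b
      rw [List.drop_one] at ih
      simp only [List.foldl_cons]
      simp [pvAStep, pvGo]
      rw [pvA_escape]
      exact ih
    · by_cases h2 : c = '\'' ∨ c = '"'
      · rcases h2 with h2 | h2 <;> subst h2
        · have ih := pvA_main (pvSkipQ '\'' rest) b
          simp only [List.foldl_cons]
          simp [pvAStep, pvGo, h1]
          rw [pvA_sq]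
          exact ih
        · have ih := pvA_main (pvSkipQ '"' rest) b
          simp only [List.foldl_cons]
          simp [pvAStep, pvGo, h1]
          rw [pvA_dq]
          exact ih
      · have hs : c ≠ '\'' := fun h => h2 (Or.inl h)
        have hd : c ≠ '"' := fun h => h2 (Or.inr h)
        by_cases h3 : c = '('
        · subst h3
          have ih := pvA_main rest (b + 1)
          simp only [List.foldl_cons]
          simp [pvAStep, pvGo, h1, hs, hd]
          exact ih
        · by_cases h4 : c = ')'
          · subst h4
            have ih := pvA_main rest (b - 1)
            simp only [List.foldl_cons]
            simp [pvAStep, pvGo, h1, hs, hd, h3]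
            exact ih
          · have ih := pvA_main rest b
            simp only [List.foldl_cons]
            simp [pvAStep, pvGo, h1, hs, hd, h3, h4]
            exact ih
termination_by cs.length
decreasing_by all_goals ((try have h := pvSkipQ_length_le c rest); (try have hq1 := pvSkipQ_length_le '\'' rest); (try have hq2 := pvSkipQ_length_le '"' rest); simp <;> omega)

-- ===== VERDICT (by name: the statement is the Claim_ definition above) =====
theorem paren_balance_py_spec : Claim_equal_paren_balance_py := by
  intro text _
  unfold Spec_paren_balance_py paren_balance_py paren_balance_py_alt
  exact pvA_main text.toList 0
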